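-- pv_equiv track=rewrite | github.com/mint-philosophy/mint-compliant-cameron | scripts/audit_complete_models.py | parse_case_id
-- ===== SOURCE A (Python) =====
-- def parse_case_id(case_id: str) -> tuple[str | None, str | None]:
--     """Extract defeat_type and authority_type from case_id.
--
--     Patterns:
--       seed_{defeat_type}_{authority_type}_{number}
--       supplement_{defeat_type}_{authority_type}_{number}
--
--     defeat_types: application_defeat, content_defeat, control,
--                   exception_justified, illegitimate_authority
--     authority_types: algorithmic_intermediary, club, contractual_counterparty,
--                      creditor_insurer, delegated_authority, faith_group, family,
--                      housing_association, landlord, military_command, national_government,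
--                      private_property_owner, profession, school, subnational_government,
--                      supranational_body, tribe, union, workplace
--     """
--     DEFEAT_TYPES = [
--         "application_defeat", "content_defeat", "control",
--         "exception_justified", "illegitimate_authority"
--     ]
--     AUTHORITY_TYPES = [
--         "algorithmic_intermediary", "club", "contractual_counterparty",
--         "creditor_insurer", "delegated_authority", "faith_group", "family",
--         "housing_association", "landlord", "military_command", "national_government",
--         "private_property_owner", "profession", "school", "subnational_government",
--         "supranational_body", "tribe", "union", "workplace"
--     ]
--
--     # Strip prefix (seed_ or supplement_)
--     rest = case_id
--     for prefix in ("seed_", "supplement_"):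
--         if rest.startswith(prefix):
--             rest = rest[len(prefix):]
--             break
--
--     # Try to match defeat_type
--     found_defeat = None
--     for dt in sorted(DEFEAT_TYPES, key=len, reverse=True):
--         if rest.startswith(dt + "_"):
--             found_defeat = dt
--             rest = rest[len(dt) + 1:]
--             break
--
--     # Try to match authority_type
--     found_auth = None
--     for at in sorted(AUTHORITY_TYPES, key=len, reverse=True):
--         if rest.startswith(at):
--             found_auth = at
--             break
--
--     return found_defeat, found_auth
-- ===== SOURCE B (Python) =====
-- def parse_case_id(case_id: str) -> tuple[str | None, str | None]:
--     """Extract defeat_type and authority_type from case_id.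
--
--     Hash-set prefix probe: instead of scanning the candidate lists and calling
--     startswith for each candidate, take each possible prefix length of the
--     remainder (longest first) and test the prefix with one set-membership lookup.
--     """
--     DEFEAT = frozenset({
--         "application_defeat", "content_defeat", "control",
--         "exception_justified", "illegitimate_authority"
--     })
--     AUTHORITY = frozenset({
--         "algorithmic_intermediary", "club", "contractual_counterparty",
--         "creditor_insurer", "delegated_authority", "faith_group", "family",
--         "housing_association", "landlord", "military_command", "national_government",
--         "private_property_owner", "profession", "school", "subnational_government",
--         "supranational_body", "tribe", "union", "workplace"
--     })
--
--     if case_id.startswith("seed_"):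
--         rest = case_id[5:]
--     elif case_id.startswith("supplement_"):
--         rest = case_id[11:]
--     else:
--         rest = case_id
--
--     # defeat type: a known word followed by "_" (22 = longest defeat type)
--     defeat = next((rest[:l] for l in range(min(len(rest) - 1, 22), 0, -1)
--                    if rest[:l] in DEFEAT and rest[l] == "_"), None)
--     if defeat is not None:
--         rest = rest[len(defeat) + 1:]
--
--     # authority type: a known word as a prefix (24 = longest authority type)
--     auth = next((rest[:l] for l in range(min(len(rest), 24), 0, -1)
--                  if rest[:l] in AUTHORITY), None)
--     return defeat, auth
-- ===== Notes on version B (the rewrite author's own statement) =====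
-- stated objective: alternative
-- what changed: Replaces A's candidate-list scans (sort by length, then startswith per candidate) by a hash-set prefix probe: take each possible prefix length of the remainder, longest first, and test the prefix with one set-membership lookup.
import Mathlib
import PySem

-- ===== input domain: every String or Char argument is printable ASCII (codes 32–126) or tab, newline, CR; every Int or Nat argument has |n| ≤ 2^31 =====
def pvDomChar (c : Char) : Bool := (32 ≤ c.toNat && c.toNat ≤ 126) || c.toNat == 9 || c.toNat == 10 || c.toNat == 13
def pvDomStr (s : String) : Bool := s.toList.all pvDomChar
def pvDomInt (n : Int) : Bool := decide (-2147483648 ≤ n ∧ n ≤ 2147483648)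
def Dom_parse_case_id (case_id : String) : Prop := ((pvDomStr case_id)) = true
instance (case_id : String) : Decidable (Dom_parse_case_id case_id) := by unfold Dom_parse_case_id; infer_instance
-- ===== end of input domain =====

-- B replaces A's sorted candidate-list scans by a hash-set prefix probe over prefix lengths
-- (alternative decomposition; equivalence of the RETURN value is proved for every string).

-- ===== PORT A =====
def pvDefeatTypes : List String :=
  ["application_defeat", "content_defeat", "control",
   "exception_justified", "illegitimate_authority"]

def pvAuthorityTypes : List String :=
  ["algorithmic_intermediary", "club", "contractual_counterparty",
   "creditor_insurer", "delegated_authority", "faith_group", "family",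
   "housing_association", "landlord", "military_command", "national_government",
   "private_property_owner", "profession", "school", "subnational_government",
   "supranational_body", "tribe", "union", "workplace"]

-- for prefix in ("seed_", "supplement_"): if rest.startswith(prefix): rest = rest[len(prefix):]; break
def pvStripPrefix : String → List String → String
  | rest, [] => rest
  | rest, p :: ps =>
      if PySem.Str.startswith rest p then
        PySem.Str.slice rest (some ((PySem.Str.len p : Int))) none
      else pvStripPrefix rest ps

-- for dt in sorted(DEFEAT_TYPES, key=len, reverse=True): if rest.startswith(dt + "_"): … break
def pvFindDefeat : String → List String → Option String × String
  | rest, [] => (none, rest)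
  | rest, dt :: ds =>
      if PySem.Str.startswith rest (dt ++ "_") then
        (some dt, PySem.Str.slice rest (some ((PySem.Str.len dt : Int) + 1)) none)
      else pvFindDefeat rest ds

-- for at in sorted(AUTHORITY_TYPES, key=len, reverse=True): if rest.startswith(at): … break
def pvFindAuthority : String → List String → Option String
  | _, [] => none
  | rest, a :: as_ => if PySem.Str.startswith rest a then some a else pvFindAuthority rest as_

def parse_case_id (case_id : String) : Option String × Option String :=
  let rest := pvStripPrefix case_id ["seed_", "supplement_"]
  let fd := pvFindDefeat rest (PySem.List.sorted pvDefeatTypes (fun s => PySem.Str.len s) true)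
  let fa := pvFindAuthority fd.2 (PySem.List.sorted pvAuthorityTypes (fun s => PySem.Str.len s) true)
  (fd.1, fa)

-- ===== PORT B =====
def pvDefeatSet : PySem.Set String :=
  PySem.Set.ofList
    ["application_defeat", "content_defeat", "control",
     "exception_justified", "illegitimate_authority"]

def pvAuthoritySet : PySem.Set String :=
  PySem.Set.ofList
    ["algorithmic_intermediary", "club", "contractual_counterparty",
     "creditor_insurer", "delegated_authority", "faith_group", "family",
     "housing_association", "landlord", "military_command", "national_government",
     "private_property_owner", "profession", "school", "subnational_government",
     "supranational_body", "tribe", "union", "workplace"]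

-- next((rest[:l] for l in range(min(len(rest)-1, 22), 0, -1) if rest[:l] in DEFEAT and rest[l] == "_"), None)
-- (range(m, 0, -1) with m ≤ 0 is empty, which is probe at Nat 0; Nat subtraction matches that)
def pvProbeDefeat (rest : String) : Nat → Option String
  | 0 => none
  | l + 1 =>
      if PySem.Set.contains pvDefeatSet (PySem.Str.slice rest none (some ((l + 1 : Nat) : Int)))
          && (PySem.Str.pyGet? rest ((l + 1 : Nat) : Int) == some '_') then
        some (PySem.Str.slice rest none (some ((l + 1 : Nat) : Int)))
      else pvProbeDefeat rest l

-- next((rest[:l] for l in range(min(len(rest), 24), 0, -1) if rest[:l] in AUTHORITY), None)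
def pvProbeAuthority (rest : String) : Nat → Option String
  | 0 => none
  | l + 1 =>
      if PySem.Set.contains pvAuthoritySet (PySem.Str.slice rest none (some ((l + 1 : Nat) : Int))) then
        some (PySem.Str.slice rest none (some ((l + 1 : Nat) : Int)))
      else pvProbeAuthority rest l

def parse_case_id_alt (case_id : String) : Option String × Option String :=
  let rest :=
    if PySem.Str.startswith case_id "seed_" then PySem.Str.slice case_id (some 5) none
    else if PySem.Str.startswith case_id "supplement_" then PySem.Str.slice case_id (some 11) none
    else case_id
  let defeat := pvProbeDefeat rest ((min (PySem.Str.len rest - 1) 22).toNat)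
  let rest2 :=
    match defeat with
    | some d => PySem.Str.slice rest (some ((PySem.Str.len d : Int) + 1)) none
    | none => rest
  let auth := pvProbeAuthority rest2 ((min (PySem.Str.len rest2) 24).toNat)
  (defeat, auth)

-- ===== PRECONDITION & SPEC =====
def Spec_parse_case_id (case_id : String) (out : Option String × Option String) : Prop := out = parse_case_id_alt case_id
instance (case_id : String) (out : Option String × Option String) : Decidable (Spec_parse_case_id case_id out) := by unfold Spec_parse_case_id; infer_instance

-- ===== CLAIM (what is proved, stated in full; the proofs are below) =====
def Claim_equal_parse_case_id : Prop := ∀ (case_id : String), Dom_parse_case_id case_id → Spec_parse_case_id case_id (parse_case_id case_id)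

-- ===== LEMMAS AND PROOFS =====

-- literal results of A's runtime sorts (evaluated once, used to reason about A's scans)
def pvSortedDefeat : List String :=
  ["illegitimate_authority", "exception_justified", "application_defeat",
   "content_defeat", "control"]

def pvSortedAuthority : List String :=
  ["algorithmic_intermediary", "contractual_counterparty", "private_property_owner",
   "subnational_government", "delegated_authority", "housing_association",
   "national_government", "supranational_body", "creditor_insurer", "military_command",
   "faith_group", "profession", "workplace", "landlord", "family", "school",
   "tribe", "union", "club"]

theorem pvSortedDefeat_eq :
    PySem.List.sorted pvDefeatTypes (fun s => PySem.Str.len s) true = pvSortedDefeat := rfl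

theorem pvSortedAuthority_eq :
    PySem.List.sorted pvAuthorityTypes (fun s => PySem.Str.len s) true = pvSortedAuthority := rfl

theorem pvSortedDefeat_mem (t : String) : t ∈ pvSortedDefeat ↔ t ∈ pvDefeatTypes :=
  (show pvSortedDefeat.Perm pvDefeatTypes by decide).mem_iff

theorem pvSortedAuthority_mem (t : String) : t ∈ pvSortedAuthority ↔ t ∈ pvAuthorityTypes :=
  (show pvSortedAuthority.Perm pvAuthorityTypes by decide).mem_iff

theorem pvDefeatSet_mem (x : String) :
    PySem.Set.contains pvDefeatSet x = true ↔ x ∈ pvDefeatTypes := by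
  rw [PySem.Set.contains_iff]
  exact Iff.of_eq (congrArg (x ∈ ·) (by decide : pvDefeatSet = pvDefeatTypes))

theorem pvAuthoritySet_mem (x : String) :
    PySem.Set.contains pvAuthoritySet x = true ↔ x ∈ pvAuthorityTypes := by
  rw [PySem.Set.contains_iff]
  exact Iff.of_eq (congrArg (x ∈ ·) (by decide : pvAuthoritySet = pvAuthorityTypes))

-- facts about the fixed candidate strings, checked by computation
theorem pvDefeatLen : ∀ t ∈ pvDefeatTypes, 1 ≤ t.toList.length ∧ t.toList.length ≤ 22 := by decide

theorem pvAuthorityLen : ∀ t ∈ pvAuthorityTypes, 1 ≤ t.toList.length ∧ t.toList.length ≤ 24 := by decide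

theorem pvDefeatNoPre : ∀ t1 ∈ pvDefeatTypes, ∀ t2 ∈ pvDefeatTypes, t1 ≠ t2 →
    ¬ (t1.toList ++ ['_']) <+: (t2.toList ++ ['_']) := by decide

theorem pvAuthorityNoPre : ∀ t1 ∈ pvAuthorityTypes, ∀ t2 ∈ pvAuthorityTypes, t1 ≠ t2 →
    ¬ t1.toList <+: t2.toList := by decide

-- two candidate patterns that are both prefixes of the same remainder are the same candidate
theorem pv_uniq {L : List String} {f : String → List Char}
    (hnp : ∀ t1 ∈ L, ∀ t2 ∈ L, t1 ≠ t2 → ¬ f t1 <+: f t2)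
    {r : List Char} {t1 t2 : String} (h1 : t1 ∈ L) (h2 : t2 ∈ L)
    (p1 : f t1 <+: r) (p2 : f t2 <+: r) : t1 = t2 := by
  by_contra hne
  rcases List.prefix_or_prefix_of_prefix p1 p2 with h | h
  · exact hnp t1 h1 t2 h2 hne h
  · exact hnp t2 h2 t1 h1 (Ne.symm hne) h

theorem pv_startswith_iff (s p : String) :
    PySem.Str.startswith s p = true ↔ p.toList <+: s.toList := by
  simp [PySem.Chars.startswith_iff]

theorem pv_slice_take (s : String) (l : Nat) :
    (PySem.Str.slice s none (some ((l : Nat) : Int))).toList = s.toList.take l := by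
  simp [PySem.List.slice_to_natCast]

theorem pv_getElem_of_append_prefix {u v : List Char} {c : Char}
    (h : (u ++ [c]) <+: v) : v[u.length]? = some c := by
  obtain ⟨w, rfl⟩ := h
  simp

-- ===== characterisation of A's scans =====
theorem pvFindAuthority_none {rest : String} :
    ∀ {L : List String}, (∀ t ∈ L, ¬ t.toList <+: rest.toList) →
      pvFindAuthority rest L = none := by
  intro L
  induction L with
  | nil => intro _; rfl
  | cons a as ih =>
      intro h
      rw [pvFindAuthority, if_neg, ih (fun t ht => h t (List.mem_cons_of_mem a ht))]
      simp only [pv_startswith_iff]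
      exact h a List.mem_cons_self

theorem pvFindAuthority_some {rest t : String} :
    ∀ {L : List String}, t ∈ L → t.toList <+: rest.toList →
      (∀ x ∈ L, x.toList <+: rest.toList → x = t) →
      pvFindAuthority rest L = some t := by
  intro L
  induction L with
  | nil => intro ht; exact absurd ht (List.not_mem_nil)
  | cons a as ih =>
      intro ht hp huniq
      by_cases ha : a.toList <+: rest.toList
      · rw [pvFindAuthority, if_pos ((pv_startswith_iff rest a).mpr ha)]
        exact congrArg some (huniq a List.mem_cons_self ha)
      · rw [pvFindAuthority, if_neg (by simpa only [pv_startswith_iff] using ha)]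
        have ht' : t ∈ as := by
          rcases List.mem_cons.mp ht with rfl | h
          · exact absurd hp ha
          · exact h
        exact ih ht' hp (fun x hx => huniq x (List.mem_cons_of_mem a hx))

theorem pv_startswith_underscore_iff (rest dt : String) :
    PySem.Str.startswith rest (dt ++ "_") = true ↔ (dt.toList ++ ['_']) <+: rest.toList := by
  rw [pv_startswith_iff]
  simp

theorem pvFindDefeat_none {rest : String} :
    ∀ {L : List String}, (∀ t ∈ L, ¬ (t.toList ++ ['_']) <+: rest.toList) →
      pvFindDefeat rest L = (none, rest) := by
  intro L
  induction L with
  | nil => intro _; rfl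
  | cons a as ih =>
      intro h
      rw [pvFindDefeat, if_neg, ih (fun t ht => h t (List.mem_cons_of_mem a ht))]
      simp only [pv_startswith_underscore_iff]
      exact h a List.mem_cons_self

theorem pvFindDefeat_some {rest t : String} :
    ∀ {L : List String}, t ∈ L → (t.toList ++ ['_']) <+: rest.toList →
      (∀ x ∈ L, (x.toList ++ ['_']) <+: rest.toList → x = t) →
      pvFindDefeat rest L = (some t, PySem.Str.slice rest (some (PySem.Str.len t + 1)) none) := by
  intro L
  induction L with
  | nil => intro ht; exact absurd ht (List.not_mem_nil)
  | cons a as ih =>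
      intro ht hp huniq
      by_cases ha : (a.toList ++ ['_']) <+: rest.toList
      · rw [pvFindDefeat, if_pos ((pv_startswith_underscore_iff rest a).mpr ha)]
        rw [huniq a List.mem_cons_self ha]
      · rw [pvFindDefeat, if_neg (by simpa only [pv_startswith_underscore_iff] using ha)]
        have ht' : t ∈ as := by
          rcases List.mem_cons.mp ht with rfl | h
          · exact absurd hp ha
          · exact h
        exact ih ht' hp (fun x hx => huniq x (List.mem_cons_of_mem a hx))

-- ===== characterisation of B's probes =====
theorem pvProbeAuthority_none {rest : String}
    (h : ∀ t ∈ pvAuthorityTypes, ¬ t.toList <+: rest.toList) :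
    ∀ n, pvProbeAuthority rest n = none := by
  intro n
  induction n with
  | zero => rfl
  | succ l ih =>
      rw [pvProbeAuthority, if_neg, ih]
      intro hc
      have hmem := (pvAuthoritySet_mem _).mp hc
      exact h _ hmem (by rw [pv_slice_take]; exact List.take_prefix _ _)

theorem pvProbeAuthority_some {rest t : String} (ht : t ∈ pvAuthorityTypes)
    (hp : t.toList <+: rest.toList)
    (huniq : ∀ x ∈ pvAuthorityTypes, x.toList <+: rest.toList → x = t) :
    ∀ n, t.toList.length ≤ n → pvProbeAuthority rest n = some t := by
  intro n
  induction n with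
  | zero =>
      intro hn
      exact absurd hn (by have := (pvAuthorityLen t ht).1; omega)
  | succ l ih =>
      intro hn
      by_cases hc : PySem.Set.contains pvAuthoritySet
          (PySem.Str.slice rest none (some ((l + 1 : Nat) : Int))) = true
      · rw [pvProbeAuthority, if_pos hc]
        exact congrArg some (huniq _ ((pvAuthoritySet_mem _).mp hc)
          (by rw [pv_slice_take]; exact List.take_prefix _ _))
      · rw [pvProbeAuthority, if_neg hc]
        apply ih
        rcases Nat.lt_or_ge t.toList.length (l + 1) with hlt | hge
        · omega
        · exfalso
          have hlen : t.toList.length = l + 1 := by omega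
          have htake : rest.toList.take (l + 1) = t.toList := by
            rw [← hlen]; exact (List.prefix_iff_eq_take.mp hp).symm
          have : PySem.Str.slice rest none (some ((l + 1 : Nat) : Int)) = t :=
            String.toList_inj.mp (by rw [pv_slice_take, htake])
          exact hc (this ▸ (pvAuthoritySet_mem t).mpr ht)

theorem pvProbeDefeat_none {rest : String}
    (h : ∀ t ∈ pvDefeatTypes, ¬ (t.toList ++ ['_']) <+: rest.toList) :
    ∀ n, pvProbeDefeat rest n = none := by
  intro n
  induction n with
  | zero => rfl
  | succ l ih =>
      rw [pvProbeDefeat, if_neg, ih]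
      intro hc
      rw [Bool.and_eq_true] at hc
      obtain ⟨hc1, hc2⟩ := hc
      have hmem := (pvDefeatSet_mem _).mp hc1
      have hget : rest.toList[l + 1]? = some '_' := by
        have h := beq_iff_eq.mp hc2
        rwa [PySem.Str.pyGet?_natCast] at h
      apply h _ hmem
      rw [pv_slice_take]
      have : rest.toList.take (l + 1 + 1) = rest.toList.take (l + 1) ++ ['_'] := by
        rw [List.take_add_one, hget]; rfl
      rw [← this]
      exact List.take_prefix _ _

theorem pvProbeDefeat_some {rest t : String} (ht : t ∈ pvDefeatTypes)
    (hp : (t.toList ++ ['_']) <+: rest.toList)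
    (huniq : ∀ x ∈ pvDefeatTypes, (x.toList ++ ['_']) <+: rest.toList → x = t) :
    ∀ n, t.toList.length ≤ n → pvProbeDefeat rest n = some t := by
  intro n
  induction n with
  | zero =>
      intro hn
      exact absurd hn (by have := (pvDefeatLen t ht).1; omega)
  | succ l ih =>
      intro hn
      by_cases hc : (PySem.Set.contains pvDefeatSet
            (PySem.Str.slice rest none (some ((l + 1 : Nat) : Int)))
          && (PySem.Str.pyGet? rest ((l + 1 : Nat) : Int) == some '_')) = true
      · rw [pvProbeDefeat, if_pos hc]
        rw [Bool.and_eq_true] at hc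
        obtain ⟨hc1, hc2⟩ := hc
        have hget : rest.toList[l + 1]? = some '_' := by
          have h := beq_iff_eq.mp hc2
          rwa [PySem.Str.pyGet?_natCast] at h
        apply congrArg some
        apply huniq _ ((pvDefeatSet_mem _).mp hc1)
        rw [pv_slice_take]
        have : rest.toList.take (l + 1 + 1) = rest.toList.take (l + 1) ++ ['_'] := by
          rw [List.take_add_one, hget]; rfl
        rw [← this]
        exact List.take_prefix _ _
      · rw [pvProbeDefeat, if_neg hc]
        apply ih
        rcases Nat.lt_or_ge t.toList.length (l + 1) with hlt | hge
        · omega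
        · exfalso
          have hlen : t.toList.length = l + 1 := by omega
          have hpre : t.toList <+: rest.toList :=
            (List.prefix_append t.toList ['_']).trans hp
          have htake : rest.toList.take (l + 1) = t.toList := by
            rw [← hlen]; exact (List.prefix_iff_eq_take.mp hpre).symm
          have hs : PySem.Str.slice rest none (some ((l + 1 : Nat) : Int)) = t :=
            String.toList_inj.mp (by rw [pv_slice_take, htake])
          have hget : rest.toList[l + 1]? = some '_' := by
            rw [← hlen]
            exact pv_getElem_of_append_prefix hp
          apply hc
          rw [Bool.and_eq_true]
          constructor
          · exact hs ▸ (pvDefeatSet_mem t).mpr ht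
          · rw [beq_iff_eq, PySem.Str.pyGet?_natCast]
            exact hget
  
-- ===== the two scans agree with the two probes =====
theorem pv_defeat_main (rest : String) :
    pvFindDefeat rest (PySem.List.sorted pvDefeatTypes (fun s => PySem.Str.len s) true)
      = (pvProbeDefeat rest ((min (PySem.Str.len rest - 1) 22).toNat),
         match pvProbeDefeat rest ((min (PySem.Str.len rest - 1) 22).toNat) with
         | some d => PySem.Str.slice rest (some (PySem.Str.len d + 1)) none
         | none => rest) := by
  rw [pvSortedDefeat_eq]
  by_cases hm : ∃ t ∈ pvDefeatTypes, (t.toList ++ ['_']) <+: rest.toList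
  · obtain ⟨t, ht, hp⟩ := hm
    have huniq : ∀ x ∈ pvDefeatTypes, (x.toList ++ ['_']) <+: rest.toList → x = t :=
      fun x hx hpx => pv_uniq pvDefeatNoPre hx ht hpx hp
    have hbound : t.toList.length ≤ (min (PySem.Str.len rest - 1) 22).toNat := by
      have h1 := (pvDefeatLen t ht).2
      have h2 : (t.toList ++ ['_']).length ≤ rest.toList.length := hp.length_le
      have h3 : PySem.Str.len rest = (rest.toList.length : Int) := by
        simp [PySem.Str.len_eq]
      simp only [List.length_append, List.length_cons, List.length_nil] at h2
      omega
    rw [pvProbeDefeat_some ht hp huniq _ hbound]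
    rw [pvFindDefeat_some ((pvSortedDefeat_mem t).mpr ht) hp
      (fun x hx => huniq x ((pvSortedDefeat_mem x).mp hx))]
  · push Not at hm
    rw [pvProbeDefeat_none hm]
    exact pvFindDefeat_none (fun t ht => hm t ((pvSortedDefeat_mem t).mp ht))

theorem pv_auth_main (rest : String) :
    pvFindAuthority rest (PySem.List.sorted pvAuthorityTypes (fun s => PySem.Str.len s) true)
      = pvProbeAuthority rest ((min (PySem.Str.len rest) 24).toNat) := by
  rw [pvSortedAuthority_eq]
  by_cases hm : ∃ t ∈ pvAuthorityTypes, t.toList <+: rest.toList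
  · obtain ⟨t, ht, hp⟩ := hm
    have huniq : ∀ x ∈ pvAuthorityTypes, x.toList <+: rest.toList → x = t :=
      fun x hx hpx => pv_uniq pvAuthorityNoPre hx ht hpx hp
    have hbound : t.toList.length ≤ (min (PySem.Str.len rest) 24).toNat := by
      have h1 := (pvAuthorityLen t ht).2
      have h2 : t.toList.length ≤ rest.toList.length := hp.length_le
      have h3 : PySem.Str.len rest = (rest.toList.length : Int) := by
        simp [PySem.Str.len_eq]
      omega
    rw [pvProbeAuthority_some ht hp huniq _ hbound]
    exact pvFindAuthority_some ((pvSortedAuthority_mem t).mpr ht) hp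
      (fun x hx => huniq x ((pvSortedAuthority_mem x).mp hx))
  · push Not at hm
    rw [pvProbeAuthority_none hm]
    exact pvFindAuthority_none (fun t ht => hm t ((pvSortedAuthority_mem t).mp ht))

-- ===== VERDICT (by name: the statement is the Claim_ definition above) =====
theorem parse_case_id_spec : Claim_equal_parse_case_id := by
  intro case_id _
  show parse_case_id case_id = parse_case_id_alt case_id
  unfold parse_case_id parse_case_id_alt
  have hstrip : pvStripPrefix case_id ["seed_", "supplement_"] =
      (if PySem.Str.startswith case_id "seed_" then PySem.Str.slice case_id (some 5) none
       else if PySem.Str.startswith case_id "supplement_" then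
         PySem.Str.slice case_id (some 11) none
       else case_id) := rfl
  rw [hstrip]
  simp only []
  set rest := (if PySem.Str.startswith case_id "seed_" then PySem.Str.slice case_id (some 5) none
       else if PySem.Str.startswith case_id "supplement_" then
         PySem.Str.slice case_id (some 11) none
       else case_id) with hrest
  rw [pv_defeat_main rest]
  cases hprobe : pvProbeDefeat rest ((min (PySem.Str.len rest - 1) 22).toNat) with
  | none => simp only [pv_auth_main]
  | some d => simp only [pv_auth_main]
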